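-- pv_equiv track=rewrite | github.com/zhansoft/pythoncourseh200 | labs/lab7/lab7.py | sum20list
-- ===== SOURCE A (Python) =====
-- def sum20list(mat):
--     """
--     Recursively go through and sum all the valeus from each row and
--     add the result of each row together to get a final value
--     """
--     if not mat:
--         return 0
--     else:
--         total = 0
--         for i in range(len(mat[0])):
--             total += mat[0][i]
--         return total + sum20list(mat[1:])
-- ===== SOURCE B (Python) =====
-- def sum20list(mat):
--     total = 0
--     for row in mat:
--         for v in row:
--             total += v
--     return total
-- ===== Notes on version B (the rewrite author's own statement) =====
-- stated objective: simpler
-- what changed: Replaced the recursion over mat[1:] with one flat iterative pass accumulating every element into a single total.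
import Mathlib
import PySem

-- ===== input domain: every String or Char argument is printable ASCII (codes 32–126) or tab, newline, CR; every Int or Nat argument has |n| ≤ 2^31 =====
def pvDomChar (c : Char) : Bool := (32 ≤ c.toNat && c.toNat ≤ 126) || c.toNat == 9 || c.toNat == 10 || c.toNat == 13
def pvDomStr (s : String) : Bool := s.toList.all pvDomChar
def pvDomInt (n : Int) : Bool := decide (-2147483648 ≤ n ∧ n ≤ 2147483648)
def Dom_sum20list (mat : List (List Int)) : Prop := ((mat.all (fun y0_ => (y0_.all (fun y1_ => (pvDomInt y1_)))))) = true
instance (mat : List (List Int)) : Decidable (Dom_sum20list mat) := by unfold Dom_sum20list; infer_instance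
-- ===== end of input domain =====

-- B replaces A's recursion over mat[1:] with one flat iterative pass; simpler, no slicing.

-- ===== PORT A =====
-- transliteration of A: empty check, sum row 0 by index over range(len), recurse on the tail slice
def sum20list (mat : List (List Int)) : Int :=
  match mat with
  | [] => 0
  | row0 :: rest =>
    let total :=
      (PySem.List.pyRange 0 (Int.ofNat row0.length) 1).foldl
        (fun total i => total + PySem.List.pyGetD row0 i 0) 0
    total + sum20list (PySem.List.slice (row0 :: rest) (some 1) none)
decreasing_by
  rw [PySem.List.slice_from_one]
  simp

-- ===== PORT B =====
-- transliteration of B: nested loops accumulating every element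
def sum20list_alt (mat : List (List Int)) : Int :=
  mat.foldl (fun total row => row.foldl (fun t v => t + v) total) 0

-- ===== PRECONDITION & SPEC =====
def Spec_sum20list (mat : List (List Int)) (out : Int) : Prop := out = sum20list_alt mat
instance (mat : List (List Int)) (out : Int) : Decidable (Spec_sum20list mat out) := by unfold Spec_sum20list; infer_instance

-- ===== CLAIM (what is proved, stated in full; the proofs are below) =====
def Claim_equal_sum20list : Prop := ∀ (mat : List (List Int)), Dom_sum20list mat → Spec_sum20list mat (sum20list mat)

-- ===== LEMMAS AND PROOFS =====

theorem foldl_add_eq (l : List Int) (t : Int) : l.foldl (fun a b => a + b) t = t + l.sum := by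
  induction l generalizing t with
  | nil => simp
  | cons x xs ih => simp [ih]; ring

theorem rowsum_eq (row : List Int) :
    (PySem.List.pyRange 0 (Int.ofNat row.length) 1).foldl
        (fun total i => total + PySem.List.pyGetD row i 0) 0 = row.sum := by
  have h := PySem.List.foldl_pyRange_pyGetD (a := 0) (xs := row)
      (f := fun (t v : Int) => t + v) (init := 0) (d := 0) (by omega)
  simp only [Int.toNat_zero, List.drop_zero, PySem.List.len] at h
  rw [show Int.ofNat row.length = (row.length : Int) from rfl, h]
  rw [foldl_add_eq]
  simp

theorem alt_eq_sum (mat : List (List Int)) : sum20list_alt mat = (mat.map List.sum).sum := by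
  unfold sum20list_alt
  induction mat with
  | nil => simp
  | cons r rs ih =>
    simp only [List.foldl_cons, List.map_cons, List.sum_cons]
    rw [foldl_add_eq]
    have gen : ∀ (rows : List (List Int)) (t : Int),
        rows.foldl (fun total row => row.foldl (fun a b => a + b) total) t
          = t + (rows.map List.sum).sum := by
      intro rows
      induction rows with
      | nil => simp
      | cons q qs ihq => intro t; simp only [List.foldl_cons]; rw [foldl_add_eq, ihq]; simp; ring
    rw [gen]; ring

theorem a_eq_sum (mat : List (List Int)) : sum20list mat = (mat.map List.sum).sum := by
  induction mat with
  | nil => rw [sum20list]; simp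
  | cons r rs ih =>
    rw [sum20list]
    rw [PySem.List.slice_from_one]
    simp only [List.tail_cons]
    rw [ih, rowsum_eq]
    simp

-- ===== VERDICT (by name: the statement is the Claim_ definition above) =====
theorem sum20list_spec : Claim_equal_sum20list := by
  intro mat _
  unfold Spec_sum20list
  rw [a_eq_sum, alt_eq_sum]
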